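-- pv_equiv track=rewrite | github.com/Valdemar322/alevel_hw | home_work/hw4/ courier.py | get_apartment
-- ===== SOURCE A (Python) =====
-- def get_apartment(floors, apartments_floor, apartment_number, entrance=5):
--     if ((floors and apartments_floor and apartments_floor) > 0) and (
--             apartment_number <= floors * apartments_floor * entrance):
--
--         all_apartment_number = []
--         all_apartment_number2 = []
--         temp_apartment_counter = []
--
--         # Get numbers apartments
--         for x in range(floors * apartments_floor * entrance):
--             all_apartment_number.append(x + 1)
--
--         # Create double-array for division apartments into floors
--         for number in all_apartment_number:
--             if not number % apartments_floor:
--                 temp_apartment_counter.append(number)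
--                 all_apartment_number2.append(temp_apartment_counter)
--                 temp_apartment_counter = []
--             else:
--                 temp_apartment_counter.append(number)
--
--         # Main logic
--         for floor, apartments in enumerate(all_apartment_number2):
--             if apartment_number in apartments:
--                 current_entrance = (floor // floors) + 1
--                 current_floor = (floor + 1) - floors * (current_entrance - 1)
--                 return (f"Your apartment with number: {apartment_number} is located as:"
--                         f"\nEntrance: {current_entrance}\nFloor: {current_floor}")
--     else:
--         return f"You are entered incorrect values!"
-- ===== SOURCE B (Python) =====
-- def get_apartment(floors, apartments_floor, apartment_number, entrance=5):
--     total = floors * apartments_floor * entrance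
--     if floors > 0 and apartments_floor > 0 and 1 <= apartment_number <= total:
--         floor_index = (apartment_number - 1) // apartments_floor
--         current_entrance = floor_index // floors + 1
--         current_floor = floor_index % floors + 1
--         return (f"Your apartment with number: {apartment_number} is located as:"
--                 f"\nEntrance: {current_entrance}\nFloor: {current_floor}")
--     return "You are entered incorrect values!"
-- ===== Notes on version B (the rewrite author's own statement) =====
-- stated objective: faster
-- what changed: A materialises every apartment number, partitions them into per-floor chunks and linearly scans the chunks; B validates the input and computes floor_index=(apartment_number-1)//apartments_floor, entrance and floor directly in O(1). Pre_ excludes inputs where A falls off the end of its search loop and returns None instead of a message string (apartment_number < 1 while A's guard passes).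
-- intended difference: On negative floors with apartments_floor > 0 and 1 <= apartment_number <= floors*apartments_floor*entrance (possible only with a negative entrance count), A returns a located-apartment string with nonsensical entrance/floor values (e.g. Entrance: 0), while B returns the error message; a building cannot have a negative number of floors, so rejecting the input is the intended behaviour. — e.g. on get_apartment(-1, 1, 1, -1): A returns some "Your apartment with number: 1 is located as:\nEntrance: 1\nFloor: 1", B returns some "You are entered incorrect values!"
-- outside the precondition, e.g. on get_apartment(2, 3, -5, 5): A returns None, B returns 'You are entered incorrect values!'
import Mathlib
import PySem

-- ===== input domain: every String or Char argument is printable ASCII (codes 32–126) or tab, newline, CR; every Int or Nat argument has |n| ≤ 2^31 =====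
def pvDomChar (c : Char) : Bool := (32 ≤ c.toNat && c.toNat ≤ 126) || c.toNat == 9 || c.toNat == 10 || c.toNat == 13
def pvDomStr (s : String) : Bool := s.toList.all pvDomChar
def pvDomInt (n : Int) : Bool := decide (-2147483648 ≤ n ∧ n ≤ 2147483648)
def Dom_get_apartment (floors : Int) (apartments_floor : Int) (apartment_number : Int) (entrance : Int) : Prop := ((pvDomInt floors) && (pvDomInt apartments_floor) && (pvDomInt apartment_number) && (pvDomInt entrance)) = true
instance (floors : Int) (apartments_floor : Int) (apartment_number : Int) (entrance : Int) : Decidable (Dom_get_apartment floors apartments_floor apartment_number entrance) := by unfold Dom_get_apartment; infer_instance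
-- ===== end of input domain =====

-- B replaces A's three list-building loops with O(1) integer arithmetic ((n-1)//apartments_floor etc.); objective: faster.

-- ===== PORT A =====
-- the early-returning 'for floor, apartments in enumerate(...)' loop of A
def get_apartment_searchA (floors : Int) (apartment_number : Int) : List (List Int) → Int → Option String
  | [], _ => none
  | apartments :: rest, floor =>
    if apartment_number ∈ apartments then
      let current_entrance := PySem.Int.floordiv floor floors + 1
      let current_floor := (floor + 1) - floors * (current_entrance - 1)
      some ("Your apartment with number: " ++ PySem.Int.toStr apartment_number ++ " is located as:"
            ++ "\nEntrance: " ++ PySem.Int.toStr current_entrance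
            ++ "\nFloor: " ++ PySem.Int.toStr current_floor)
    else get_apartment_searchA floors apartment_number rest (floor + 1)

def get_apartment (floors : Int) (apartments_floor : Int) (apartment_number : Int) (entrance : Int) : Option String :=
  -- Python 'floors and apartments_floor and apartments_floor' returns the first falsy value, else the last;
  -- Python lists (O(1) append) are represented by Array (O(1) push)
  if (if floors = 0 then floors else if apartments_floor = 0 then apartments_floor else apartments_floor) > 0
      ∧ apartment_number ≤ floors * apartments_floor * entrance then
    let all_apartment_number : Array Int :=
      (PySem.List.pyRange 0 (floors * apartments_floor * entrance) 1).foldl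
        (fun acc x => acc.push (x + 1)) #[]
    let st :=
      all_apartment_number.toList.foldl
        (fun (st : Array (Array Int) × Array Int) number =>
          if PySem.Int.mod number apartments_floor = 0 then
            (st.1.push (st.2.push number), #[])
          else (st.1, st.2.push number))
        (#[], #[])
    get_apartment_searchA floors apartment_number (st.1.toList.map Array.toList) 0
  else some "You are entered incorrect values!"

-- ===== PORT B =====
def get_apartment_alt (floors : Int) (apartments_floor : Int) (apartment_number : Int) (entrance : Int) : Option String :=
  let total := floors * apartments_floor * entrance
  if 0 < floors ∧ 0 < apartments_floor ∧ 1 ≤ apartment_number ∧ apartment_number ≤ total then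
    let floor_index := PySem.Int.floordiv (apartment_number - 1) apartments_floor
    let current_entrance := PySem.Int.floordiv floor_index floors + 1
    let current_floor := PySem.Int.mod floor_index floors + 1
    some ("Your apartment with number: " ++ PySem.Int.toStr apartment_number ++ " is located as:"
          ++ "\nEntrance: " ++ PySem.Int.toStr current_entrance
          ++ "\nFloor: " ++ PySem.Int.toStr current_floor)
  else some "You are entered incorrect values!"

-- ===== PRECONDITION & SPEC =====
-- Pre_ excludes the inputs on which A's guard passes but its search loop finds nothing (apartment_number < 1),
-- where A falls off the function and returns None instead of a message string (not a value of the declared str type).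
def Pre_get_apartment (floors : Int) (apartments_floor : Int) (apartment_number : Int) (entrance : Int) : Prop :=
  ¬ (floors ≠ 0 ∧ 0 < apartments_floor ∧ apartment_number ≤ floors * apartments_floor * entrance ∧ apartment_number < 1)
instance (floors : Int) (apartments_floor : Int) (apartment_number : Int) (entrance : Int) : Decidable (Pre_get_apartment floors apartments_floor apartment_number entrance) := by unfold Pre_get_apartment; infer_instance
def pvWitness_get_apartment : Int × Int × Int × Int := (9, 3, 10, 2)

-- On negative floors with apartments_floor > 0 and 1 ≤ apartment_number ≤ total (only possible with negative
-- entrance), A returns a located-apartment string with nonsensical entrance/floor values; B returns the error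
-- message, the intended behaviour for a building with a negative number of floors.
def D_get_apartment (floors : Int) (apartments_floor : Int) (apartment_number : Int) (entrance : Int) : Prop :=
  floors ≤ -1 ∧ 1 ≤ apartments_floor ∧ 1 ≤ apartment_number ∧ apartment_number ≤ entrance * (apartments_floor * floors)
instance (floors : Int) (apartments_floor : Int) (apartment_number : Int) (entrance : Int) : Decidable (D_get_apartment floors apartments_floor apartment_number entrance) := by unfold D_get_apartment; infer_instance

def Spec_get_apartment (floors : Int) (apartments_floor : Int) (apartment_number : Int) (entrance : Int) (out : Option String) : Prop := ¬ D_get_apartment floors apartments_floor apartment_number entrance → out = get_apartment_alt floors apartments_floor apartment_number entrance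
instance (floors : Int) (apartments_floor : Int) (apartment_number : Int) (entrance : Int) (out : Option String) : Decidable (Spec_get_apartment floors apartments_floor apartment_number entrance out) := by unfold Spec_get_apartment; infer_instance

def pvDiffWitness_get_apartment : Int × Int × Int × Int := (-1, 1, 1, -1)
def pvDiffWitnessOut_get_apartment : (Option String) × (Option String) :=
  (some "Your apartment with number: 1 is located as:\nEntrance: 1\nFloor: 1",
   some "You are entered incorrect values!")

-- ===== CLAIM (what is proved, stated in full; the proofs are below) =====
def Claim_unchanged_get_apartment : Prop := ∀ (floors : Int) (apartments_floor : Int) (apartment_number : Int) (entrance : Int), Dom_get_apartment floors apartments_floor apartment_number entrance → Pre_get_apartment floors apartments_floor apartment_number entrance → Spec_get_apartment floors apartments_floor apartment_number entrance (get_apartment floors apartments_floor apartment_number entrance)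
def Claim_changed_get_apartment : Prop := Dom_get_apartment (pvDiffWitness_get_apartment.1) (pvDiffWitness_get_apartment.2.1) (pvDiffWitness_get_apartment.2.2.1) (pvDiffWitness_get_apartment.2.2.2) ∧ Pre_get_apartment (pvDiffWitness_get_apartment.1) (pvDiffWitness_get_apartment.2.1) (pvDiffWitness_get_apartment.2.2.1) (pvDiffWitness_get_apartment.2.2.2) ∧ D_get_apartment (pvDiffWitness_get_apartment.1) (pvDiffWitness_get_apartment.2.1) (pvDiffWitness_get_apartment.2.2.1) (pvDiffWitness_get_apartment.2.2.2) ∧ get_apartment (pvDiffWitness_get_apartment.1) (pvDiffWitness_get_apartment.2.1) (pvDiffWitness_get_apartment.2.2.1) (pvDiffWitness_get_apartment.2.2.2) = pvDiffWitnessOut_get_apartment.1 ∧ get_apartment_alt (pvDiffWitness_get_apartment.1) (pvDiffWitness_get_apartment.2.1) (pvDiffWitness_get_apartment.2.2.1) (pvDiffWitness_get_apartment.2.2.2) = pvDiffWitnessOut_get_apartment.2 ∧ pvDiffWitnessOut_get_apartment.1 ≠ pvDiffWitnessOut_get_apartment.2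
def Claim_exact_get_apartment : Prop := ∀ (floors : Int) (apartments_floor : Int) (apartment_number : Int) (entrance : Int), Dom_get_apartment floors apartments_floor apartment_number entrance → Pre_get_apartment floors apartments_floor apartment_number entrance → D_get_apartment floors apartments_floor apartment_number entrance → get_apartment floors apartments_floor apartment_number entrance ≠ get_apartment_alt floors apartments_floor apartment_number entrance

-- ===== LEMMAS AND PROOFS =====

-- the j-th block of apartment numbers, j*m+1 .. (j+1)*m
def pvBlk (m j : Int) : List Int := PySem.List.pyRange (j * m + 1) (j * m + m + 1) 1

-- the string A's found branch produces at chunk index fi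
def pvMkRes (floors apartment_number fi : Int) : Option String :=
  some ("Your apartment with number: " ++ PySem.Int.toStr apartment_number ++ " is located as:"
        ++ "\nEntrance: " ++ PySem.Int.toStr (PySem.Int.floordiv fi floors + 1)
        ++ "\nFloor: " ++ PySem.Int.toStr ((fi + 1) - floors * (PySem.Int.floordiv fi floors + 1 - 1)))

theorem pv_partial_fold (m : Int) (s : Int) (acc : List (List Int)) :
    ∀ (i : Nat), (i : Int) < m → m ∣ s →
      (PySem.List.pyRange (s + 1) (s + i + 1) 1).foldl
        (fun (st : List (List Int) × List Int) number =>
          if PySem.Int.mod number m = 0 then (st.1 ++ [st.2 ++ [number]], ([] : List Int))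
          else (st.1, st.2 ++ [number])) (acc, [])
      = (acc, PySem.List.pyRange (s + 1) (s + i + 1) 1) := by
  intro i
  induction i with
  | zero =>
    intro _ _
    rw [PySem.List.pyRange_one_eq_nil (by push_cast; omega)]
    simp
  | succ i ih =>
    intro hlt hdvd
    have hi : (i : Int) < m := by push_cast at hlt ⊢; omega
    have hstep : s + (i + 1 : Nat) + 1 = (s + (i : Int) + 1) + 1 := by push_cast; ring
    rw [hstep, PySem.List.pyRange_one_succ_right (by omega), List.foldl_append,
        ih hi hdvd]
    have hnd : ¬ m ∣ (s + (i : Int) + 1) := by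
      intro hd
      have : m ∣ ((i : Int) + 1) := by
        have := hd.sub hdvd
        simpa [add_assoc] using this
      have := Int.le_of_dvd (by omega) this
      omega
    simp only [List.foldl_cons, List.foldl_nil]
    rw [if_neg (by rw [PySem.Int.mod_eq_zero_iff_dvd]; exact hnd)]

-- full single block: fold over pvBlk m c from (acc, []) appends the block
theorem pv_block_fold (m : Int) (hm : 0 < m) (c : Int) (acc : List (List Int)) :
    (pvBlk m c).foldl
        (fun (st : List (List Int) × List Int) number =>
          if PySem.Int.mod number m = 0 then (st.1 ++ [st.2 ++ [number]], ([] : List Int))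
          else (st.1, st.2 ++ [number])) (acc, [])
      = (acc ++ [pvBlk m c], []) := by
  have hdvd : m ∣ c * m := Dvd.intro_left c rfl
  have h1 : c * m + m + 1 = (c * m + m) + 1 := rfl
  have hcast : ((m - 1).toNat : Int) = m - 1 := by omega
  have hsplit : pvBlk m c = PySem.List.pyRange (c * m + 1) (c * m + (m-1).toNat + 1) 1 ++ [c * m + m] := by
    unfold pvBlk
    rw [h1, PySem.List.pyRange_one_succ_right (by omega), hcast]
    congr 2
    omega
  rw [hsplit, List.foldl_append, pv_partial_fold m (c*m) acc (m-1).toNat (by omega) hdvd]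
  simp only [List.foldl_cons, List.foldl_nil]
  rw [if_pos (by rw [PySem.Int.mod_eq_zero_iff_dvd]; exact ⟨c+1, by ring⟩)]

theorem pv_chunks (m : Int) (hm : 0 < m) :
    ∀ (k : Nat) (c : Int) (acc : List (List Int)),
      (PySem.List.pyRange (c * m + 1) (c * m + m * k + 1) 1).foldl
        (fun (st : List (List Int) × List Int) number =>
          if PySem.Int.mod number m = 0 then (st.1 ++ [st.2 ++ [number]], ([] : List Int))
          else (st.1, st.2 ++ [number])) (acc, [])
      = (acc ++ (List.range k).map (fun j : Nat => pvBlk m (c + (j:Int))), []) := by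
  intro k
  induction k with
  | zero =>
    intro c acc
    rw [PySem.List.pyRange_one_eq_nil (by push_cast; omega)]
    simp
  | succ k ih =>
    intro c acc
    have hsplit : PySem.List.pyRange (c * m + 1) (c * m + m * (k+1:Nat) + 1) 1
        = pvBlk m c ++ PySem.List.pyRange ((c+1) * m + 1) ((c+1) * m + m * k + 1) 1 := by
      rw [show (c+1) * m + 1 = c * m + m + 1 by ring]
      rw [show (c+1) * m + m * k + 1 = c * m + m * (k+1:Nat) + 1 by push_cast; ring]
      unfold pvBlk
      exact PySem.List.pyRange_one_append _ _ _ (by omega) (by push_cast; nlinarith [Int.natCast_nonneg k])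
    rw [hsplit, List.foldl_append, pv_block_fold m hm c acc, ih (c+1) (acc ++ [pvBlk m c])]
    rw [List.range_succ_eq_map]
    simp only [List.map_cons, List.map_map, Nat.cast_zero, add_zero, List.append_assoc, List.singleton_append]
    refine congrArg (fun l => (acc ++ l, ([]:List Int))) ?_
    congr 1
    refine List.map_congr_left ?_
    intro j _
    simp only [Function.comp_apply]
    congr 1
    push_cast
    ring

theorem pv_map_range_succ (m c : Int) (k : Nat) :
    (List.range (k+1)).map (fun j : Nat => pvBlk m (c + (j:Int)))
      = pvBlk m c :: (List.range k).map (fun j : Nat => pvBlk m (c + 1 + (j:Int))) := by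
  rw [List.range_succ_eq_map]
  simp only [List.map_cons, List.map_map, Nat.cast_zero, add_zero]
  congr 1
  refine List.map_congr_left ?_
  intro j _
  simp only [Function.comp_apply]
  congr 1
  push_cast
  ring

theorem pv_search (floors a m : Int) (hm : 0 < m) :
    ∀ (k : Nat) (c fl : Int),
      get_apartment_searchA floors a ((List.range k).map (fun j : Nat => pvBlk m (c + (j:Int)))) fl
      = if c * m < a ∧ a ≤ c * m + m * k then
          pvMkRes floors a (fl + PySem.Int.floordiv (a - c * m - 1) m) else none := by
  intro k
  induction k with
  | zero =>
    intro c fl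
    rw [if_neg (by push_cast; omega)]
    rfl
  | succ k ih =>
    intro c fl
    rw [pv_map_range_succ]
    by_cases hmem : c * m < a ∧ a ≤ c * m + m
    · have hin : a ∈ pvBlk m c := by
        unfold pvBlk
        rw [PySem.List.mem_pyRange_one]
        omega
      rw [get_apartment_searchA, if_pos hin]
      have hk0 : (0:Int) ≤ m * (k:Int) := by positivity
      rw [if_pos (by
        push_cast
        have e2 : m * ((k:Int) + 1) = m * (k:Int) + m := by ring
        exact ⟨hmem.1, by linarith [hmem.2, hk0]⟩)]
      have hdiv : PySem.Int.floordiv (a - c * m - 1) m = 0 := by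
        rw [PySem.Int.floordiv_eq_iff_of_pos hm]
        omega
      rw [hdiv, add_zero]
      rfl
    · have hnin : a ∉ pvBlk m c := by
        unfold pvBlk
        rw [PySem.List.mem_pyRange_one]
        omega
      rw [get_apartment_searchA, if_neg hnin, ih (c+1) (fl+1)]
      have hk0 : (0:Int) ≤ m * (k:Int) := by positivity
      have hiff : ((c+1) * m < a ∧ a ≤ (c+1) * m + m * (k:Int)) ↔
          (c * m < a ∧ a ≤ c * m + m * ((k:Nat)+1:Nat)) := by
        push_cast
        rw [show ((c:Int)+1) * m = c * m + m from by ring,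
            show m * ((k:Int) + 1) = m * (k:Int) + m from by ring]
        obtain ⟨P, hP⟩ : ∃ P, c * m = P := ⟨_, rfl⟩
        obtain ⟨Q, hQ⟩ : ∃ Q, m * (k:Int) = Q := ⟨_, rfl⟩
        rw [hP] at hmem ⊢
        rw [hQ] at hk0 ⊢
        omega
      by_cases hc : (c+1) * m < a ∧ a ≤ (c+1) * m + m * (k:Int)
      · rw [if_pos hc, if_pos (hiff.mp hc)]
        have hx : a - (c+1) * m - 1 = (a - c * m - 1) + (-1) * m := by ring
        rw [PySem.Int.floordiv_eq_ediv_of_pos hm, PySem.Int.floordiv_eq_ediv_of_pos hm, hx,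
            Int.add_mul_ediv_right _ _ hm.ne']
        congr 1
        ring
      · rw [if_neg hc, if_neg (fun h => hc (hiff.mpr h))]

theorem pv_shift (T : Int) :
    (PySem.List.pyRange 0 T 1).map (fun x => x + 1) = PySem.List.pyRange 1 (T + 1) 1 := by
  rw [PySem.List.pyRange_one, PySem.List.pyRange_one, List.map_map]
  rw [show (T + 1 - 1).toNat = (T - 0).toNat from by omega]
  refine List.map_congr_left fun k _ => ?_
  simp [Function.comp]
  ring

theorem pv_toList_fold1 (l : List Int) :
    ∀ (A : Array Int),
      (l.foldl (fun acc x => acc.push (x + 1)) A).toList = A.toList ++ l.map (fun x => x + 1) := by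
  induction l with
  | nil => intro A; simp
  | cons x t ih =>
    intro A
    simp [List.foldl_cons]

theorem pv_arr_fold (m : Int) (l : List Int) :
    ∀ (A : Array (Array Int)) (B : Array Int),
      (((l.foldl (fun (st : Array (Array Int) × Array Int) number =>
            if PySem.Int.mod number m = 0 then (st.1.push (st.2.push number), #[])
            else (st.1, st.2.push number)) (A, B)).1.toList.map Array.toList),
        (l.foldl (fun (st : Array (Array Int) × Array Int) number =>
            if PySem.Int.mod number m = 0 then (st.1.push (st.2.push number), #[])
            else (st.1, st.2.push number)) (A, B)).2.toList)
      = l.foldl (fun (st : List (List Int) × List Int) number =>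
            if PySem.Int.mod number m = 0 then (st.1 ++ [st.2 ++ [number]], ([] : List Int))
            else (st.1, st.2 ++ [number])) (A.toList.map Array.toList, B.toList) := by
  induction l with
  | nil => intro A B; simp
  | cons x t ih =>
    intro A B
    simp only [List.foldl_cons]
    by_cases hx : PySem.Int.mod x m = 0
    · rw [if_pos hx, if_pos hx]
      have h2 := ih (A.push (B.push x)) #[]
      simpa using h2
    · rw [if_neg hx, if_neg hx]
      have h2 := ih A (B.push x)
      rwa [Array.toList_push] at h2

-- A on valid located inputs evaluates to pvMkRes at chunk index (a-1)//m
theorem pv_A_found (floors m a e : Int) (hf : floors ≠ 0) (hm : 0 < m)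
    (h1 : 1 ≤ a) (h2 : a ≤ floors * m * e) :
    get_apartment floors m a e = pvMkRes floors a (PySem.Int.floordiv (a - 1) m) := by
  unfold get_apartment
  rw [if_pos (by
    constructor
    · rw [if_neg hf]
      by_cases h0 : m = 0
      · rw [if_pos h0]; omega
      · rw [if_neg h0]; omega
    · exact h2)]
  dsimp only
  rw [pv_toList_fold1, Array.toList_empty, List.nil_append, pv_shift]
  have harr := pv_arr_fold m (PySem.List.pyRange 1 (floors * m * e + 1) 1) #[] #[]
  simp only [List.map_nil] at harr
  have hA1 := congrArg Prod.fst harr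
  dsimp only at hA1
  rw [hA1]
  have hT : 0 < floors * m * e := by omega
  have hfe : 0 < floors * e := by
    by_contra hle'
    push Not at hle'
    have : floors * m * e ≤ 0 := by nlinarith
    omega
  have hK : floors * m * e = m * ((floors * e).toNat : Int) := by
    rw [Int.toNat_of_nonneg (by omega)]; ring
  obtain ⟨Tt, hTt⟩ : ∃ Tt, floors * m * e = Tt := ⟨_, rfl⟩
  rw [hTt] at h2 hT hK ⊢
  have hrange : PySem.List.pyRange 1 (Tt + 1) 1
      = PySem.List.pyRange (0 * m + 1) (0 * m + m * ((floors * e).toNat : Int) + 1) 1 := by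
    rw [show (0:Int) * m + 1 = 1 from by ring,
        show (0:Int) * m + m * ((floors * e).toNat : Int) + 1 = Tt + 1 from by rw [← hK]; ring]
  rw [hrange, pv_chunks m hm (floors * e).toNat 0 []]
  dsimp only [List.nil_append]
  rw [pv_search floors a m hm (floors * e).toNat 0 0]
  rw [if_pos (by rw [show (0:Int) * m = 0 from by ring]; exact ⟨by omega, by rw [← hK]; omega⟩)]
  rw [show (0:Int) * m = 0 from by ring, zero_add, sub_zero]

-- the two output messages are distinct strings
theorem pv_str_ne (s : String) :
    ("Your apartment with number: " ++ s) ≠ "You are entered incorrect values!" := by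
  intro h
  have h2 := congrArg String.toList h
  simp [String.toList_append] at h2

-- B's located string equals pvMkRes (the floor formulas coincide via the div-mod identity)
theorem pv_alt_found (floors m a e : Int) (hB : 0 < floors ∧ 0 < m ∧ 1 ≤ a ∧ a ≤ floors * m * e) :
    get_apartment_alt floors m a e = pvMkRes floors a (PySem.Int.floordiv (a - 1) m) := by
  unfold get_apartment_alt pvMkRes
  rw [if_pos hB]
  dsimp only
  have hqr := PySem.Int.floordiv_mul_add_mod (PySem.Int.floordiv (a - 1) m) floors
  have hfl : PySem.Int.mod (PySem.Int.floordiv (a - 1) m) floors + 1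
      = (PySem.Int.floordiv (a - 1) m + 1)
        - floors * (PySem.Int.floordiv (PySem.Int.floordiv (a - 1) m) floors + 1 - 1) := by
    linear_combination hqr
  rw [hfl]

-- ===== VERDICT (by name: the statement is the Claim_ definition above) =====
theorem get_apartment_spec : Claim_unchanged_get_apartment := by
  intro floors m a e _dom hpre hnd
  unfold Pre_get_apartment at hpre
  unfold D_get_apartment at hnd
  push Not at hpre hnd
  by_cases hg : (if floors = 0 then floors else if m = 0 then m else m) > 0 ∧ a ≤ floors * m * e
  · -- A's guard holds: floors ≠ 0, m > 0, a ≤ total; Pre_ gives 1 ≤ a, ¬D gives 0 < floors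
    have hf : floors ≠ 0 := by
      intro h0; rw [if_pos h0] at hg; exact absurd hg.1 (by omega)
    have hm : 0 < m := by
      rcases hg with ⟨hg1, _⟩
      rw [if_neg hf] at hg1
      by_cases h0 : m = 0
      · rw [if_pos h0] at hg1; omega
      · rwa [if_neg h0] at hg1
    have ha : 1 ≤ a := by
      by_contra hlt
      exact absurd (hpre hf hm hg.2) (by omega)
    have hfp : 0 < floors := by
      rcases lt_or_gt_of_ne hf with hneg | hpos
      · exfalso
        have h' := hnd (by omega) (by omega) ha
        have heq : e * (m * floors) = floors * m * e := by ring
        omega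
      · exact hpos
    rw [pv_A_found floors m a e hf hm ha hg.2,
        pv_alt_found floors m a e ⟨hfp, hm, ha, hg.2⟩]
  · -- A's guard fails: both sides print the error message
    unfold get_apartment get_apartment_alt
    rw [if_neg hg]
    dsimp only
    rw [if_neg (by
      rintro ⟨hfp, hm, ha, hle⟩
      exact hg ⟨by rw [if_neg (by omega), if_neg (by omega)]; omega, hle⟩)]

theorem get_apartment_changed : Claim_changed_get_apartment := by
  unfold Claim_changed_get_apartment; decide

theorem get_apartment_tight : Claim_exact_get_apartment := by
  intro floors m a e _dom _hpre hd
  unfold D_get_apartment at hd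
  obtain ⟨hneg, hm1, ha, hle⟩ := hd
  have hm : 0 < m := by omega
  have hle' : a ≤ floors * m * e := by
    have heq : e * (m * floors) = floors * m * e := by ring
    omega
  rw [pv_A_found floors m a e (by omega) hm ha hle']
  unfold get_apartment_alt
  rw [if_neg (by rintro ⟨hfp, _⟩; omega)]
  unfold pvMkRes
  intro h
  have h2 := Option.some.inj h
  simp only [String.append_assoc] at h2
  exact pv_str_ne _ h2
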